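-- pv_equiv track=rewrite | github.com/csh2-admin/pied_piper | app.py | _from_flat_items
-- ===== SOURCE A (Python) =====
-- def _from_flat_items(items):
--     """Re-assemble flat review list back into structured dict for process_transcript."""
--     out = {
--         "maintenance_performed":    [],
--         "qualitative_observations": [],
--         "system_performance":       [],
--         "action_items":             [],
--     }
--     for item in items:
--         cat = item.get("_category", "Observation")
--         # Strip internal keys before storing
--         r = {k: v for k, v in item.items() if not k.startswith("_")}
--         if cat == "Maintenance":
--             # Ensure required field present
--             if "_text" in item:
--                 r["activity_performed"] = r.get("activity_performed") or item["_text"]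
--             out["maintenance_performed"].append(r)
--         elif cat == "Observation":
--             if "_text" in item:
--                 r["observation"] = r.get("observation") or item["_text"]
--             out["qualitative_observations"].append(r)
--         elif cat == "Performance":
--             out["system_performance"].append(r)
--         elif cat == "Action Item":
--             if "_text" in item:
--                 r["action_text"] = r.get("action_text") or item["_text"]
--             out["action_items"].append(r)
--     return out
-- ===== SOURCE B (Python) =====
-- def _from_flat_items(items):
--     """Re-assemble flat review list back into structured dict (staged per-category passes)."""
--     def category(item):
--         return item.get("_category", "Observation")
--
--     def clean(item, field=None):
--         r = {k: v for k, v in item.items() if not k.startswith("_")}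
--         if field is not None and "_text" in item:
--             r[field] = r.get(field) or item["_text"]
--         return r
--
--     return {
--         "maintenance_performed":
--             [clean(i, "activity_performed") for i in items if category(i) == "Maintenance"],
--         "qualitative_observations":
--             [clean(i, "observation") for i in items if category(i) == "Observation"],
--         "system_performance":
--             [clean(i) for i in items if category(i) == "Performance"],
--         "action_items":
--             [clean(i, "action_text") for i in items if category(i) == "Action Item"],
--     }
-- ===== Notes on version B (the rewrite author's own statement) =====
-- stated objective: alternative
-- what changed: Replaces A's single pass that mutates a pre-initialized output dict through a four-way if/elif chain by four independent staged passes: the output dict is built directly, each value a filter-by-category + clean comprehension over items.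
import Mathlib
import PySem

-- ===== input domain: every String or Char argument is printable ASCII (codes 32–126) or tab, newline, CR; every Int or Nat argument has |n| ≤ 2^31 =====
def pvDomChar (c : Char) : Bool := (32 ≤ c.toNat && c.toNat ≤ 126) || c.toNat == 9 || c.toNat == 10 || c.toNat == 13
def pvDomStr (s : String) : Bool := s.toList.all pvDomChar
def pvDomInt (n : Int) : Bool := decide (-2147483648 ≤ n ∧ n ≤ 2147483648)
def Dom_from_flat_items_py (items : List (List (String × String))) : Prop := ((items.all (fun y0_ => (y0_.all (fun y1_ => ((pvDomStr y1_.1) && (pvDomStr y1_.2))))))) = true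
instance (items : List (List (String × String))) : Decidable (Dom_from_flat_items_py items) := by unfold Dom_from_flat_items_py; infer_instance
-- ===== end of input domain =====

-- B builds the output dict directly from four independent per-category filter+map passes,
-- instead of A's single pass mutating a pre-initialized output dict through an if/elif chain.

-- shared primitive: the Python value  `x or t`  for an optional string x (empty string is falsy)
def pyOrStr (x : Option String) (t : String) : String :=
  match x with
  | some v => if v == "" then t else v
  | none => t

-- ===== PORT A =====
-- `r = {k: v for k, v in item.items() if not k.startswith("_")}`
def stripInternalA (d : PySem.Dict String String) : PySem.Dict String String :=
  PySem.Dict.mk (d.items.filter (fun p => !(PySem.Str.startswith p.1 "_")))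

-- one iteration of A's loop: the if/elif chain over the category
def stepA (out : PySem.Dict String (List (List (String × String))))
    (item : List (String × String)) : PySem.Dict String (List (List (String × String))) :=
  let d := PySem.Dict.ofList item
  let cat := d.getD "_category" "Observation"
  let r := stripInternalA d
  if cat == "Maintenance" then
    let r := match d.get? "_text" with
      | some t => r.insert "activity_performed" (pyOrStr (r.get? "activity_performed") t)
      | none => r
    out.modify "maintenance_performed" [] (· ++ [r.items])
  else if cat == "Observation" then
    let r := match d.get? "_text" with
      | some t => r.insert "observation" (pyOrStr (r.get? "observation") t)
      | none => r
    out.modify "qualitative_observations" [] (· ++ [r.items])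
  else if cat == "Performance" then
    out.modify "system_performance" [] (· ++ [r.items])
  else if cat == "Action Item" then
    let r := match d.get? "_text" with
      | some t => r.insert "action_text" (pyOrStr (r.get? "action_text") t)
      | none => r
    out.modify "action_items" [] (· ++ [r.items])
  else
    out

def from_flat_items_py (items : List (List (String × String))) : List (String × List (List (String × String))) :=
  (items.foldl stepA (PySem.Dict.ofList
    [("maintenance_performed", []), ("qualitative_observations", []),
     ("system_performance", []), ("action_items", [])])).items

-- ===== PORT B =====
-- Source B's `category(item)`
def categoryB (item : List (String × String)) : String :=
  (PySem.Dict.ofList item).getD "_category" "Observation"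

-- Source B's `clean(item, field)`
def cleanB (item : List (String × String)) (field : Option String) : List (String × String) :=
  let d := PySem.Dict.ofList item
  let r := PySem.Dict.mk (d.items.filter (fun p => !(PySem.Str.startswith p.1 "_")))
  let r := match field, d.get? "_text" with
    | some f, some t => r.insert f (pyOrStr (r.get? f) t)
    | _, _ => r
  r.items

def from_flat_items_py_alt (items : List (List (String × String))) : List (String × List (List (String × String))) :=
  [("maintenance_performed",
      (items.filter (fun i => categoryB i == "Maintenance")).map (fun i => cleanB i (some "activity_performed"))),
   ("qualitative_observations",
      (items.filter (fun i => categoryB i == "Observation")).map (fun i => cleanB i (some "observation"))),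
   ("system_performance",
      (items.filter (fun i => categoryB i == "Performance")).map (fun i => cleanB i none)),
   ("action_items",
      (items.filter (fun i => categoryB i == "Action Item")).map (fun i => cleanB i (some "action_text")))]

-- ===== PRECONDITION & SPEC =====
def Spec_from_flat_items_py (items : List (List (String × String))) (out : List (String × List (List (String × String)))) : Prop := out = from_flat_items_py_alt items
instance (items : List (List (String × String))) (out : List (String × List (List (String × String)))) : Decidable (Spec_from_flat_items_py items out) := by unfold Spec_from_flat_items_py; infer_instance

-- ===== CLAIM (what is proved, stated in full; the proofs are below) =====
def Claim_equal_from_flat_items_py : Prop := ∀ (items : List (List (String × String))), Dom_from_flat_items_py items → Spec_from_flat_items_py items (from_flat_items_py items)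

-- ===== LEMMAS AND PROOFS =====

-- A's loop body, re-expressed through B's helpers (categoryB / cleanB)
theorem stepA_cases (out : PySem.Dict String (List (List (String × String))))
    (item : List (String × String)) :
    stepA out item =
      if categoryB item == "Maintenance" then
        out.modify "maintenance_performed" [] (· ++ [cleanB item (some "activity_performed")])
      else if categoryB item == "Observation" then
        out.modify "qualitative_observations" [] (· ++ [cleanB item (some "observation")])
      else if categoryB item == "Performance" then
        out.modify "system_performance" [] (· ++ [cleanB item none])
      else if categoryB item == "Action Item" then
        out.modify "action_items" [] (· ++ [cleanB item (some "action_text")])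
      else out := by
  simp only [stepA, categoryB, cleanB, stripInternalA]
  split_ifs <;> (cases (PySem.Dict.ofList item).get? "_text" <;> rfl)

-- `modify` at each of the four (distinct, literal) bucket keys, reduced on the literal dict
theorem modify_bucket1 (l1 l2 l3 l4 : List (List (String × String)))
    (f : List (List (String × String)) → List (List (String × String))) :
    (PySem.Dict.mk [("maintenance_performed", l1), ("qualitative_observations", l2),
        ("system_performance", l3), ("action_items", l4)]).modify "maintenance_performed" [] f =
      PySem.Dict.mk [("maintenance_performed", f l1), ("qualitative_observations", l2),
        ("system_performance", l3), ("action_items", l4)] := rfl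
theorem modify_bucket2 (l1 l2 l3 l4 : List (List (String × String)))
    (f : List (List (String × String)) → List (List (String × String))) :
    (PySem.Dict.mk [("maintenance_performed", l1), ("qualitative_observations", l2),
        ("system_performance", l3), ("action_items", l4)]).modify "qualitative_observations" [] f =
      PySem.Dict.mk [("maintenance_performed", l1), ("qualitative_observations", f l2),
        ("system_performance", l3), ("action_items", l4)] := rfl
theorem modify_bucket3 (l1 l2 l3 l4 : List (List (String × String)))
    (f : List (List (String × String)) → List (List (String × String))) :
    (PySem.Dict.mk [("maintenance_performed", l1), ("qualitative_observations", l2),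
        ("system_performance", l3), ("action_items", l4)]).modify "system_performance" [] f =
      PySem.Dict.mk [("maintenance_performed", l1), ("qualitative_observations", l2),
        ("system_performance", f l3), ("action_items", l4)] := rfl
theorem modify_bucket4 (l1 l2 l3 l4 : List (List (String × String)))
    (f : List (List (String × String)) → List (List (String × String))) :
    (PySem.Dict.mk [("maintenance_performed", l1), ("qualitative_observations", l2),
        ("system_performance", l3), ("action_items", l4)]).modify "action_items" [] f =
      PySem.Dict.mk [("maintenance_performed", l1), ("qualitative_observations", l2),
        ("system_performance", l3), ("action_items", f l4)] := rfl

-- loop invariant: A's fold from any four-bucket state appends exactly B's per-category buckets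
theorem foldl_stepA_inv (items : List (List (String × String)))
    (l1 l2 l3 l4 : List (List (String × String))) :
    items.foldl stepA (PySem.Dict.mk
      [("maintenance_performed", l1), ("qualitative_observations", l2),
       ("system_performance", l3), ("action_items", l4)]) =
    PySem.Dict.mk
      [("maintenance_performed",
          l1 ++ (items.filter (fun i => categoryB i == "Maintenance")).map (fun i => cleanB i (some "activity_performed"))),
       ("qualitative_observations",
          l2 ++ (items.filter (fun i => categoryB i == "Observation")).map (fun i => cleanB i (some "observation"))),
       ("system_performance",
          l3 ++ (items.filter (fun i => categoryB i == "Performance")).map (fun i => cleanB i none)),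
       ("action_items",
          l4 ++ (items.filter (fun i => categoryB i == "Action Item")).map (fun i => cleanB i (some "action_text")))] := by
  induction items generalizing l1 l2 l3 l4 with
  | nil => simp
  | cons item rest ih =>
    simp only [List.foldl_cons, List.filter_cons, stepA_cases]
    by_cases h1 : categoryB item == "Maintenance" <;>
      [skip; by_cases h2 : categoryB item == "Observation"] <;>
      [skip; skip; by_cases h3 : categoryB item == "Performance"] <;>
      [skip; skip; skip; by_cases h4 : categoryB item == "Action Item"] <;>
      simp_all [modify_bucket1, modify_bucket2, modify_bucket3, modify_bucket4,
        List.append_assoc]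

-- ===== VERDICT (by name: the statement is the Claim_ definition above) =====
theorem from_flat_items_py_spec : Claim_equal_from_flat_items_py := by
  intro items _
  unfold Spec_from_flat_items_py from_flat_items_py from_flat_items_py_alt
  rw [show PySem.Dict.ofList
      [("maintenance_performed", ([] : List (List (String × String)))), ("qualitative_observations", []),
       ("system_performance", []), ("action_items", [])] = PySem.Dict.mk
      [("maintenance_performed", []), ("qualitative_observations", []),
       ("system_performance", []), ("action_items", [])] from rfl,
    foldl_stepA_inv]
  rfl
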